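-- pv_equiv track=rewrite | github.com/yannickloth/W33-Theory | tests/test_matroid_theory_computation.py | _matroid_rank
-- ===== SOURCE A (Python) =====
-- class _UnionFind:
--     def __init__(self, n):
--         self.parent = list(range(n))
--         self.sz = [1] * n
--         self.num_components = n
--
--     def find(self, x):
--         while self.parent[x] != x:
--             self.parent[x] = self.parent[self.parent[x]]
--             x = self.parent[x]
--         return x
--
--     def union(self, a, b):
--         a, b = self.find(a), self.find(b)
--         if a == b:
--             return False
--         if self.sz[a] < self.sz[b]:
--             a, b = b, a
--         self.parent[b] = a
--         self.sz[a] += self.sz[b]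
--         self.num_components -= 1
--         return True
--
--     def connected(self, a, b):
--         return self.find(a) == self.find(b)
--
-- def _matroid_rank(edges, n, edge_indices):
--     """Compute rank of edge subset in graphic matroid using union-find."""
--     uf = _UnionFind(n)
--     rank = 0
--     for idx in edge_indices:
--         u, v = edges[idx]
--         if uf.union(u, v):
--             rank += 1
--     return rank
-- ===== SOURCE B (Python) =====
-- def _matroid_rank(edges, n, edge_indices):
--     """Compute rank of edge subset in graphic matroid via flat component labels."""
--     comp = list(range(n))
--     rank = 0
--     for idx in edge_indices:
--         u, v = edges[idx]
--         cu, cv = comp[u], comp[v]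
--         if cu != cv:
--             comp = [cu if c == cv else c for c in comp]
--             rank += 1
--     return rank
-- ===== Notes on version B (the rewrite author's own statement) =====
-- stated objective: alternative
-- what changed: Replaces the union-find forest (parent/size arrays, path-halving find, union by size) with a flat component-label list: each edge that joins two differently-labelled endpoints bumps the rank and relabels one class to the other in a single scan.
import Mathlib
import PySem

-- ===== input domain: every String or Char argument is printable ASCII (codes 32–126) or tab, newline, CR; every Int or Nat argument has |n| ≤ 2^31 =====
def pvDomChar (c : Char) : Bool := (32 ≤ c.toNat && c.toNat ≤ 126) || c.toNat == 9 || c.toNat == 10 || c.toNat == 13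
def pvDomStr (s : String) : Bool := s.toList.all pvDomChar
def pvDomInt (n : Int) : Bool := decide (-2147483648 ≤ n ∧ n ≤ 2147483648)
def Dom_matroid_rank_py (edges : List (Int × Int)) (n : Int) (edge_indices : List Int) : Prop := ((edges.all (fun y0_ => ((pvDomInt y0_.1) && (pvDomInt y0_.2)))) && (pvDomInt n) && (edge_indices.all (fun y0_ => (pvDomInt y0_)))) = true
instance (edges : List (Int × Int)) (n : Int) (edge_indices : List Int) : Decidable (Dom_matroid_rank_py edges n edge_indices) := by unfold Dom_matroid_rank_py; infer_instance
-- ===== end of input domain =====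

-- B replaces A's union-find (parent/size arrays, path-halving find) by a flat component-label
-- list relabelled by a scan per merging edge: an alternative data structure of similar cost.

-- ===== PORT A =====
-- _UnionFind.find with path halving: 'while parent[x] != x: parent[x] = parent[parent[x]]; x = parent[x]'.
-- The while-loop is ported with a fuel bound (parent.length + 1 at every call site, sufficient under
-- Pre_, where the parent array is an acyclic forest); the 'none' fallbacks are Python IndexError,
-- excluded by Pre_.
def pvFindA (fuel : Nat) (parent : List Int) (x : Int) : Int × List Int :=
  match fuel with
  | 0 => (x, parent)
  | fuel + 1 =>
    match PySem.List.pyGet? parent x with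
    | none => (x, parent)
    | some px =>
      if px = x then (x, parent)
      else
        match PySem.List.pyGet? parent px with
        | none => (x, parent)
        | some ppx => pvFindA fuel (PySem.List.pySetD parent x ppx) ppx

-- _UnionFind.union; state is (parent, sz, num_components); returns (bool, new state).
def pvUnionA (parent sz : List Int) (ncomp : Int) (a0 b0 : Int) : Bool × List Int × List Int × Int :=
  let fa := pvFindA (parent.length + 1) parent a0
  let a := fa.1
  let parent1 := fa.2
  let fb := pvFindA (parent1.length + 1) parent1 b0
  let b := fb.1
  let parent2 := fb.2
  if a = b then (false, parent2, sz, ncomp)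
  else
    let ab := if PySem.List.pyGetD sz a 0 < PySem.List.pyGetD sz b 0 then (b, a) else (a, b)
    (true, PySem.List.pySetD parent2 ab.2 ab.1,
      PySem.List.pySetD sz ab.1 (PySem.List.pyGetD sz ab.1 0 + PySem.List.pyGetD sz ab.2 0),
      ncomp - 1)

def matroid_rank_py (edges : List (Int × Int)) (n : Int) (edge_indices : List Int) : Int :=
  let st :=
    edge_indices.foldl
      (fun (st : List Int × List Int × Int × Int) idx =>
        match PySem.List.pyGet? edges idx with
        | none => st  -- IndexError, excluded by Pre_
        | some uv =>
          let r := pvUnionA st.1 st.2.1 st.2.2.1 uv.1 uv.2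
          (r.2.1, r.2.2.1, r.2.2.2, if r.1 then st.2.2.2 + 1 else st.2.2.2))
      ((List.range n.toNat).map Int.ofNat, List.replicate n.toNat (1 : Int), n, 0)
  st.2.2.2

-- ===== PORT B =====
def matroid_rank_py_alt (edges : List (Int × Int)) (n : Int) (edge_indices : List Int) : Int :=
  let st :=
    edge_indices.foldl
      (fun (st : List Int × Int) idx =>
        match PySem.List.pyGet? edges idx with
        | none => st  -- IndexError, excluded by Pre_
        | some uv =>
          match PySem.List.pyGet? st.1 uv.1, PySem.List.pyGet? st.1 uv.2 with
          | some cu, some cv =>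
            if cu ≠ cv then (st.1.map (fun c => if c = cv then cu else c), st.2 + 1) else st
          | _, _ => st)  -- IndexError, excluded by Pre_
      ((List.range n.toNat).map Int.ofNat, 0)
  st.2

-- ===== PRECONDITION & SPEC =====
-- Exactly the inputs where Python A returns (no IndexError): every index into edges is in range
-- (Python semantics, negative allowed) and every selected edge's endpoints are valid indices into
-- the length-n vertex arrays, i.e. in [-n, n).
def Pre_matroid_rank_py (edges : List (Int × Int)) (n : Int) (edge_indices : List Int) : Prop :=
  (edge_indices.all (fun idx =>
    match PySem.List.pyGet? edges idx with
    | some uv => decide (-n ≤ uv.1 ∧ uv.1 < n ∧ -n ≤ uv.2 ∧ uv.2 < n)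
    | none => false)) = true
instance (edges : List (Int × Int)) (n : Int) (edge_indices : List Int) : Decidable (Pre_matroid_rank_py edges n edge_indices) := by unfold Pre_matroid_rank_py; infer_instance

def pvWitness_matroid_rank_py : (List (Int × Int)) × Int × List Int := ([(0, 1), (1, 2), (0, 2)], 4, [0, 1, 2])

def Spec_matroid_rank_py (edges : List (Int × Int)) (n : Int) (edge_indices : List Int) (out : Int) : Prop := out = matroid_rank_py_alt edges n edge_indices
instance (edges : List (Int × Int)) (n : Int) (edge_indices : List Int) (out : Int) : Decidable (Spec_matroid_rank_py edges n edge_indices out) := by unfold Spec_matroid_rank_py; infer_instance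

-- ===== CLAIM (what is proved, stated in full; the proofs are below) =====
def Claim_equal_matroid_rank_py : Prop := ∀ (edges : List (Int × Int)) (n : Int) (edge_indices : List Int), Dom_matroid_rank_py edges n edge_indices → Pre_matroid_rank_py edges n edge_indices → Spec_matroid_rank_py edges n edge_indices (matroid_rank_py edges n edge_indices)

-- ===== LEMMAS AND PROOFS =====
def pvNorm (L : Nat) (x : Int) : Nat := (if x < 0 then x + L else x).toNat
lemma pvGet?_of_bounds (l : List Int) (x : Int) (h1 : -(l.length : Int) ≤ x)
    (h2 : x < l.length) : PySem.List.pyGet? l x = some (l.getD (pvNorm l.length x) 0) := by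
  simp only [PySem.List.pyGet?, PySem.List.pyIdx?, pvNorm]
  by_cases hx : 0 ≤ x
  · have : ¬ x < 0 := by omega
    simp [hx, h2, this, List.getD_eq_getElem?_getD]
  · have hx0 : x < 0 := by omega
    simp only [hx, if_false, h1, if_true, hx0, if_true, Option.bind_some]
    have he : l.length - (-x).toNat = (x + l.length).toNat := by omega
    rw [he, List.getD_eq_getElem?_getD, List.getElem?_eq_getElem (by omega)]
    simp
lemma pvSetD_of_bounds (l : List Int) (x : Int) (v : Int) (h1 : -(l.length : Int) ≤ x)
    (h2 : x < l.length) : PySem.List.pySetD l x v = l.set (pvNorm l.length x) v := by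
  simp only [PySem.List.pySetD, PySem.List.pySet?, PySem.List.pyIdx?, pvNorm]
  by_cases hx : 0 ≤ x
  · have : ¬ x < 0 := by omega
    simp [hx, h2, this]
  · have hx0 : x < 0 := by omega
    have he : l.length - (-x).toNat = (x + l.length).toNat := by omega
    simp [hx, h1, hx0, he]
lemma pvNorm_natCast (L k : Nat) : pvNorm L ((k : Nat) : Int) = k := by
  unfold pvNorm; split_ifs <;> omega
lemma pvNorm_lt (L : Nat) (x : Int) (h1 : -(L : Int) ≤ x) (h2 : x < L) : pvNorm L x < L := by
  unfold pvNorm; split_ifs <;> omega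
lemma pvSet_getD_self (l : List Int) (i : Nat) (hi : i < l.length) :
    l.set i (l.getD i 0) = l := by
  apply List.ext_getElem (by simp)
  intro j hj hj'
  rw [List.getElem_set]
  split_ifs with h
  · subst h; simp [List.getD_eq_getElem?_getD, List.getElem?_eq_getElem hi]
  · rfl
def pvStep (p : List Int) (k : Nat) : Nat := (p.getD k 0).toNat
def pvRoot (p : List Int) (k : Nat) : Prop := p.getD k 0 = (k : Int)
def pvInv (p comp : List Int) : Prop :=
  p.length = comp.length ∧
  (∀ k, k < p.length → 0 ≤ p.getD k 0 ∧ p.getD k 0 < (p.length : Int)) ∧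
  (∀ k, k < p.length → comp.getD (pvStep p k) 0 = comp.getD k 0) ∧
  (∀ k j, k < p.length → j < p.length → pvRoot p k → pvRoot p j →
      comp.getD k 0 = comp.getD j 0 → k = j) ∧
  (∀ k, k < p.length → ∃ m, pvRoot p ((pvStep p)^[m] k))
lemma pvStep_lt (p comp : List Int) (h : pvInv p comp) (k : Nat) (hk : k < p.length) :
    pvStep p k < p.length := by
  obtain ⟨-, hr, -⟩ := h
  have := hr k hk
  unfold pvStep
  omega
lemma pvIter_lt (p comp : List Int) (h : pvInv p comp) (m k : Nat) (hk : k < p.length) :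
    (pvStep p)^[m] k < p.length := by
  induction m generalizing k with
  | zero => simpa
  | succ m ih =>
    rw [Function.iterate_succ_apply]
    exact ih _ (pvStep_lt p comp h k hk)

lemma pvReach_bound (p comp : List Int) (h : pvInv p comp) (k : Nat) (hk : k < p.length)
    (hr : ∃ m, pvRoot p ((pvStep p)^[m] k)) :
    ∃ m, m < p.length ∧ pvRoot p ((pvStep p)^[m] k) := by
  haveI : DecidablePred (fun m => pvRoot p ((pvStep p)^[m] k)) := by
    intro m; unfold pvRoot; infer_instance
  set m := Nat.find hr with hm
  refine ⟨m, ?_, Nat.find_spec hr⟩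
  by_contra hge
  rw [Nat.not_lt] at hge
  have hinj : Function.Injective (fun i : Fin (m + 1) => (⟨(pvStep p)^[i.1] k, pvIter_lt p comp h i.1 k hk⟩ : Fin p.length)) := by
    intro i j hij
    simp only [Fin.mk.injEq] at hij
    by_contra hne
    rcases Nat.lt_or_ge i.1 j.1 with hlt | hge2
    · have : (pvStep p)^[m - j.1 + i.1] k = (pvStep p)^[m] k := by
        rw [Function.iterate_add_apply, hij, ← Function.iterate_add_apply]
        congr 1
        omega
      have hroot : pvRoot p ((pvStep p)^[m - j.1 + i.1] k) := this ▸ Nat.find_spec hr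
      have := Nat.find_min hr (m := m - j.1 + i.1) (by omega)
      exact this hroot
    · rcases Nat.lt_or_ge j.1 i.1 with hlt2 | hge3
      · have : (pvStep p)^[m - i.1 + j.1] k = (pvStep p)^[m] k := by
          rw [Function.iterate_add_apply, ← hij, ← Function.iterate_add_apply]
          congr 1
          omega
        have hroot : pvRoot p ((pvStep p)^[m - i.1 + j.1] k) := this ▸ Nat.find_spec hr
        have := Nat.find_min hr (m := m - i.1 + j.1) (by omega)
        exact this hroot
      · exact hne (Fin.ext (by omega))
  have := Fintype.card_le_of_injective _ hinj
  simp at this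
  omega
lemma pvGetD_set (l : List Int) (i j : Nat) (v : Int) (hi : i < l.length) :
    (l.set i v).getD j 0 = if j = i then v else l.getD j 0 := by
  simp only [List.getD_eq_getElem?_getD, List.getElem?_set]
  by_cases h : i = j
  · subst h; simp [hi]
  · simp [h, Ne.symm h]

lemma pvStep_set (p : List Int) (k j : Nat) (v : Nat) (hk : k < p.length) :
    pvStep (p.set k ((v : Nat) : Int)) j = if j = k then v else pvStep p j := by
  unfold pvStep
  rw [pvGetD_set p k j _ hk]
  split_ifs <;> simp

lemma pvNotRoot_k (p : List Int) (k k1 : Nat) (hk1 : p.getD k 0 = (k1 : Int)) (hne : k1 ≠ k) :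
    ¬ pvRoot p k := by
  unfold pvRoot; rw [hk1]; exact_mod_cast fun h => hne (by exact_mod_cast h)

lemma pvK2_ne (p comp : List Int) (h : pvInv p comp) (k k1 : Nat)
    (hk : k < p.length) (hk1 : p.getD k 0 = (k1 : Int)) (hne : k1 ≠ k) :
    pvStep p k1 ≠ k := by
  intro hk2
  obtain ⟨m, hm⟩ := h.2.2.2.2 k hk
  have hsk : pvStep p k = k1 := by unfold pvStep; rw [hk1]; simp
  have hnk : ¬ pvRoot p k := pvNotRoot_k p k k1 hk1 hne
  have hnk1 : ¬ pvRoot p k1 := by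
    intro hr
    have : pvStep p k1 = k1 := by unfold pvStep; rw [hr]; simp
    omega
  have hmem : ∀ i, (pvStep p)^[i] k = k ∨ (pvStep p)^[i] k = k1 := by
    intro i
    induction i with
    | zero => left; rfl
    | succ i ih =>
      rw [Function.iterate_succ_apply']
      rcases ih with h1 | h1 <;> rw [h1]
      · right; exact hsk
      · left; exact hk2
  rcases hmem m with h1 | h1 <;> rw [h1] at hm
  · exact hnk hm
  · exact hnk1 hm

lemma pvHalve_root_iff (p comp : List Int) (h : pvInv p comp) (k k1 : Nat)
    (hk : k < p.length) (hk1 : p.getD k 0 = (k1 : Int)) (hne : k1 ≠ k) (j : Nat) :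
    pvRoot (p.set k ((pvStep p k1 : Nat) : Int)) j ↔ pvRoot p j := by
  unfold pvRoot
  rw [pvGetD_set p k j _ hk]
  split_ifs with hj
  · rw [hj]
    have h2 := pvK2_ne p comp h k k1 hk hk1 hne
    constructor
    · intro hh; exact absurd (by exact_mod_cast hh) h2
    · intro hh; exact absurd (pvNotRoot_k p k k1 hk1 hne hh) (by simp)

  · rfl

lemma pvK2_reach (p comp : List Int) (h : pvInv p comp) (k k1 m : Nat)
    (hk : k < p.length) (hk1 : p.getD k 0 = (k1 : Int)) (hne : k1 ≠ k)
    (hm : pvRoot p ((pvStep p)^[m] k)) :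
    ∃ m' ≤ m - 1, pvRoot p ((pvStep p)^[m'] (pvStep p k1)) := by
  have hsk : pvStep p k = k1 := by unfold pvStep; rw [hk1]; simp
  have hnk : ¬ pvRoot p k := pvNotRoot_k p k k1 hk1 hne
  have hm1 : m ≠ 0 := by rintro rfl; exact hnk hm
  have hit1 : (pvStep p)^[m] k = (pvStep p)^[m - 1] k1 := by
    conv_lhs => rw [show m = (m - 1) + 1 by omega]
    rw [Function.iterate_succ_apply, hsk]
  by_cases hr1 : pvRoot p k1
  · have : pvStep p k1 = k1 := by unfold pvStep; rw [hr1]; simp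
    exact ⟨0, by omega, by simpa [this]⟩
  · have hm2 : m - 1 ≠ 0 := by
      rintro h0; rw [hit1, h0] at hm; exact hr1 hm
    refine ⟨m - 2, by omega, ?_⟩
    have h3 : (pvStep p)^[m - 1] k1 = (pvStep p)^[m - 2] (pvStep p k1) := by
      conv_lhs => rw [show m - 1 = (m - 2) + 1 by omega]
      rw [Function.iterate_succ_apply]
    rw [hit1, h3] at hm
    exact hm

lemma pvHalve_reach (p comp : List Int) (h : pvInv p comp) (k k1 : Nat)
    (hk : k < p.length) (hk1 : p.getD k 0 = (k1 : Int)) (hne : k1 ≠ k) :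
    ∀ m j, j < p.length → pvRoot p ((pvStep p)^[m] j) →
      ∃ m' ≤ m, pvRoot (p.set k ((pvStep p k1 : Nat) : Int))
        ((pvStep (p.set k ((pvStep p k1 : Nat) : Int)))^[m'] j) := by
  intro m
  induction m using Nat.strong_induction_on with
  | _ m ih =>
    intro j hj hm
    set p' := p.set k ((pvStep p k1 : Nat) : Int) with hp'
    by_cases hr : pvRoot p j
    · exact ⟨0, by omega, by simpa using (pvHalve_root_iff p comp h k k1 hk hk1 hne j).2 hr⟩
    · have hm0 : m ≠ 0 := by rintro rfl; exact hr hm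
      by_cases hjk : j = k
      · subst hjk
        obtain ⟨t, ht, hroott⟩ := pvK2_reach p comp h j k1 m hj hk1 hne hm
        obtain ⟨m'', hm'', hroot''⟩ := ih t (by omega) (pvStep p k1)
          (pvStep_lt p comp h k1 (by have := h.2.1 j hj; rw [hk1] at this; omega)) hroott
        have hstep' : pvStep p' j = pvStep p k1 := by
          rw [hp', pvStep_set p j j _ hj]
          simp
        refine ⟨m'' + 1, by omega, ?_⟩
        rw [Function.iterate_succ_apply, hstep']
        exact hroot''
      · have hstep' : pvStep p' j = pvStep p j := by
          rw [hp', pvStep_set p k j _ hk]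
          simp [hjk]
        have hit : (pvStep p)^[m] j = (pvStep p)^[m - 1] (pvStep p j) := by
          conv_lhs => rw [show m = (m - 1) + 1 by omega]
          rw [Function.iterate_succ_apply]
        rw [hit] at hm
        obtain ⟨m'', hm'', hroot''⟩ := ih (m - 1) (by omega) (pvStep p j)
          (pvStep_lt p comp h j hj) hm
        refine ⟨m'' + 1, by omega, ?_⟩
        rw [Function.iterate_succ_apply, hstep']
        exact hroot''

lemma pvHalve_inv (p comp : List Int) (h : pvInv p comp) (k k1 : Nat)
    (hk : k < p.length) (hk1 : p.getD k 0 = (k1 : Int)) (hne : k1 ≠ k) :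
    pvInv (p.set k ((pvStep p k1 : Nat) : Int)) comp := by
  have hk1L : k1 < p.length := by have := h.2.1 k hk; rw [hk1] at this; omega
  have hk2L : pvStep p k1 < p.length := pvStep_lt p comp h k1 hk1L
  have hsk : pvStep p k = k1 := by unfold pvStep; rw [hk1]; simp
  set p' := p.set k ((pvStep p k1 : Nat) : Int) with hp'
  have hlen : p'.length = p.length := by simp [hp']
  have hget : ∀ j, p'.getD j 0 = if j = k then ((pvStep p k1 : Nat) : Int) else p.getD j 0 :=
    fun j => pvGetD_set p k j _ hk
  have hstep : ∀ j, pvStep p' j = if j = k then pvStep p k1 else pvStep p j :=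
    fun j => pvStep_set p k j _ hk
  refine ⟨by rw [hlen]; exact h.1, ?_, ?_, ?_, ?_⟩
  · intro j hj
    rw [hlen] at hj ⊢
    rw [hget j]
    split_ifs
    · constructor
      · positivity
      · exact_mod_cast hk2L
    · exact h.2.1 j hj
  · intro j hj
    rw [hlen] at hj
    rw [hstep j]
    split_ifs with hjk
    · subst hjk
      calc comp.getD (pvStep p k1) 0 = comp.getD k1 0 := h.2.2.1 k1 hk1L
        _ = comp.getD (pvStep p j) 0 := by rw [hsk]
        _ = comp.getD j 0 := h.2.2.1 j hj
    · exact h.2.2.1 j hj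
  · intro a b ha hb hra hrb hc
    rw [hlen] at ha hb
    exact h.2.2.2.1 a b ha hb
      ((pvHalve_root_iff p comp h k k1 hk hk1 hne a).1 hra)
      ((pvHalve_root_iff p comp h k k1 hk hk1 hne b).1 hrb) hc
  · intro j hj
    rw [hlen] at hj
    obtain ⟨m, hm⟩ := h.2.2.2.2 j hj
    obtain ⟨m', -, hm'⟩ := pvHalve_reach p comp h k k1 hk hk1 hne m j hj hm
    exact ⟨m', hm'⟩
lemma pvFindA_go (comp : List Int) : ∀ m fuel (p : List Int) (k : Nat), pvInv p comp →
    k < p.length → pvRoot p ((pvStep p)^[m] k) → m < fuel →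
    ∃ r p', pvFindA fuel p ((k : Nat) : Int) = (((r : Nat) : Int), p') ∧ r < p.length ∧
      pvRoot p' r ∧ comp.getD r 0 = comp.getD k 0 ∧ p'.length = p.length ∧ pvInv p' comp ∧
      (∀ j, pvRoot p' j ↔ pvRoot p j) := by
  intro m
  induction m using Nat.strong_induction_on with
  | _ m ih =>
    intro fuel p k hInv hk hm hfuel
    obtain ⟨f, rfl⟩ : ∃ f, fuel = f + 1 := ⟨fuel - 1, by omega⟩
    have hget : PySem.List.pyGet? p ((k : Nat) : Int) = some (p.getD k 0) := by
      rw [pvGet?_of_bounds p _ (by omega) (by exact_mod_cast hk), pvNorm_natCast]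
    by_cases hroot : pvRoot p k
    · refine ⟨k, p, ?_, hk, hroot, rfl, rfl, hInv, fun j => Iff.rfl⟩
      rw [pvFindA, hget, hroot]
      simp
    · obtain ⟨hge, hlt⟩ := hInv.2.1 k hk
      set k1 : Nat := (p.getD k 0).toNat with hk1def
      have hk1 : p.getD k 0 = (k1 : Int) := by omega
      have hk1L : k1 < p.length := by omega
      have hne : k1 ≠ k := by
        intro hh; exact hroot (by unfold pvRoot; rw [hk1, hh])
      set k2 : Nat := pvStep p k1 with hk2def
      have hk2L : k2 < p.length := pvStep_lt p comp hInv k1 hk1L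
      have hget1 : PySem.List.pyGet? p ((k1 : Nat) : Int) = some (p.getD k1 0) := by
        rw [pvGet?_of_bounds p _ (by omega) (by exact_mod_cast hk1L), pvNorm_natCast]
      have hppx : p.getD k1 0 = ((k2 : Nat) : Int) := by
        have := hInv.2.1 k1 hk1L
        rw [hk2def]; unfold pvStep; omega
      have hsetd : PySem.List.pySetD p ((k : Nat) : Int) ((k2 : Nat) : Int) = p.set k ((k2 : Nat) : Int) := by
        rw [pvSetD_of_bounds p _ _ (by omega) (by exact_mod_cast hk), pvNorm_natCast]
      have hm0 : m ≠ 0 := by rintro rfl; exact hroot hm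
      obtain ⟨t, ht, hroott⟩ := pvK2_reach p comp hInv k k1 m hk hk1 hne hm
      obtain ⟨m'', hm'', hroot''⟩ := pvHalve_reach p comp hInv k k1 hk hk1 hne t k2
        hk2L hroott
      set p' := p.set k ((k2 : Nat) : Int) with hp'
      have hlen' : p'.length = p.length := by simp [hp']
      have hInv' : pvInv p' comp := pvHalve_inv p comp hInv k k1 hk hk1 hne
      obtain ⟨r, p'', heq, hrL, hrroot, hcomp, hlen'', hInv'', hriff⟩ :=
        ih m'' (by omega) f p' k2 hInv' (by omega) hroot'' (by omega)
      refine ⟨r, p'', ?_, by omega, hrroot, ?_, by omega, hInv'', ?_⟩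
      · rw [pvFindA, hget]
        have hcond : ¬ (((k1 : Nat) : Int) = ((k : Nat) : Int)) := by exact_mod_cast hne
        simp only [hk1, hget1, hppx, hsetd]
        rw [if_neg hcond]
        exact heq
      · rw [hcomp]
        calc comp.getD k2 0 = comp.getD k1 0 := hInv.2.2.1 k1 hk1L
          _ = comp.getD (pvStep p k) 0 := rfl
          _ = comp.getD k 0 := hInv.2.2.1 k hk
      · intro j
        rw [hriff j, pvHalve_root_iff p comp hInv k k1 hk hk1 hne j]
lemma pvFindA_spec (p comp : List Int) (h : pvInv p comp) (x : Int)
    (h1 : -(p.length : Int) ≤ x) (h2 : x < p.length) :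
    ∃ r p', pvFindA (p.length + 1) p x = (((r : Nat) : Int), p') ∧ r < p.length ∧
      pvRoot p' r ∧ comp.getD r 0 = comp.getD (pvNorm p.length x) 0 ∧
      p'.length = p.length ∧ pvInv p' comp ∧ (∀ j, pvRoot p' j ↔ pvRoot p j) := by
  set nx := pvNorm p.length x with hnx
  have hnxL : nx < p.length := pvNorm_lt p.length x h1 h2
  by_cases hx : 0 ≤ x
  · have hxk : x = ((nx : Nat) : Int) := by rw [hnx]; unfold pvNorm; split_ifs <;> omega
    obtain ⟨m0, hm0⟩ := h.2.2.2.2 nx hnxL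
    obtain ⟨m, hmL, hm⟩ := pvReach_bound p comp h nx hnxL ⟨m0, hm0⟩
    rw [hxk]
    exact pvFindA_go comp m (p.length + 1) p nx h hnxL hm (by omega)
  · have hx0 : x < 0 := by omega
    have hL1 : 1 ≤ p.length := by omega
    have hget : PySem.List.pyGet? p x = some (p.getD nx 0) := pvGet?_of_bounds p x h1 h2
    obtain ⟨hge, hlt⟩ := h.2.1 nx hnxL
    set k1 : Nat := (p.getD nx 0).toNat with hk1def
    have hk1 : p.getD nx 0 = (k1 : Int) := by omega
    have hk1L : k1 < p.length := by omega
    have hcond : ¬ ((k1 : Int) = x) := by omega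
    have hget1 : PySem.List.pyGet? p ((k1 : Nat) : Int) = some (p.getD k1 0) := by
      rw [pvGet?_of_bounds p _ (by omega) (by exact_mod_cast hk1L), pvNorm_natCast]
    set k2 : Nat := pvStep p k1 with hk2def
    have hk2L : k2 < p.length := pvStep_lt p comp h k1 hk1L
    have hppx : p.getD k1 0 = ((k2 : Nat) : Int) := by
      have := h.2.1 k1 hk1L
      rw [hk2def]; unfold pvStep; omega
    have hsetd : PySem.List.pySetD p x ((k2 : Nat) : Int) = p.set nx ((k2 : Nat) : Int) := by
      rw [pvSetD_of_bounds p x _ h1 h2]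
    obtain ⟨f, hf⟩ : ∃ f, p.length + 1 = f + 1 := ⟨p.length, rfl⟩
    by_cases hroot : pvRoot p nx
    · have hk1nx : k1 = nx := by
        have : p.getD nx 0 = ((nx : Nat) : Int) := hroot
        omega
      have hk2nx : k2 = nx := by
        have : pvStep p nx = nx := by unfold pvStep; rw [hroot]; simp
        rw [hk2def, hk1nx, this]
      have hpeq : p.set nx ((k2 : Nat) : Int) = p := by
        rw [hk2nx, ← hroot]
        exact pvSet_getD_self p nx hnxL
      obtain ⟨r, p', heq, hprops⟩ :=
        pvFindA_go comp 0 p.length p nx h hnxL (by simpa using hroot) (by omega)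
      refine ⟨r, p', ?_, hprops⟩
      rw [pvFindA, hget]
      simp only [hk1, hget1, hppx, hsetd]
      rw [if_neg hcond, hpeq]
      simpa [hk2nx] using heq
    · have hne : k1 ≠ nx := by
        intro hh
        exact hroot (by unfold pvRoot; rw [hk1, hh])
      obtain ⟨m0, hm0⟩ := h.2.2.2.2 nx hnxL
      obtain ⟨m, hmL, hm⟩ := pvReach_bound p comp h nx hnxL ⟨m0, hm0⟩
      have hm1 : m ≠ 0 := by rintro rfl; exact hroot hm
      obtain ⟨t, ht, hroott⟩ := pvK2_reach p comp h nx k1 m hnxL hk1 hne hm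
      obtain ⟨m'', hm'', hroot''⟩ := pvHalve_reach p comp h nx k1 hnxL hk1 hne t k2 hk2L hroott
      set p1 := p.set nx ((k2 : Nat) : Int) with hp1
      have hlen1 : p1.length = p.length := by simp [hp1]
      have hInv1 : pvInv p1 comp := pvHalve_inv p comp h nx k1 hnxL hk1 hne
      obtain ⟨r, p', heq, hrL, hrroot, hcomp, hlen', hInv', hriff⟩ :=
        pvFindA_go comp m'' p.length p1 k2 hInv1 (by omega) hroot'' (by omega)
      refine ⟨r, p', ?_, by omega, hrroot, ?_, by omega, hInv', ?_⟩
      · rw [pvFindA, hget]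
        simp only [hk1, hget1, hppx, hsetd]
        rw [if_neg hcond]
        exact heq
      · rw [hcomp]
        calc comp.getD k2 0 = comp.getD k1 0 := h.2.2.1 k1 hk1L
          _ = comp.getD (pvStep p nx) 0 := rfl
          _ = comp.getD nx 0 := h.2.2.1 nx hnxL
      · intro j
        rw [hriff j, pvHalve_root_iff p comp h nx k1 hnxL hk1 hne j]
lemma pvGetD_map (g : Int → Int) (l : List Int) (j : Nat) (hj : j < l.length) :
    (l.map g).getD j 0 = g (l.getD j 0) := by
  rw [List.getD_eq_getElem?_getD, List.getD_eq_getElem?_getD,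
    List.getElem?_eq_getElem (by simpa), List.getElem?_eq_getElem hj]
  simp

lemma pvLink_root_iff (p : List Int) (ra rb : Nat) (hrb : rb < p.length) (hne : ra ≠ rb)
    (j : Nat) : pvRoot (p.set rb ((ra : Nat) : Int)) j ↔ j ≠ rb ∧ pvRoot p j := by
  unfold pvRoot
  rw [pvGetD_set p rb j _ hrb]
  split_ifs with hj
  · subst hj
    constructor
    · intro hh; exact absurd (by exact_mod_cast hh) hne
    · rintro ⟨hh, -⟩; exact absurd rfl hh
  · exact ⟨fun hh => ⟨hj, hh⟩, fun hh => hh.2⟩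

lemma pvLink_inv (p comp : List Int) (h : pvInv p comp) (ra rb : Nat) (cu cv : Int)
    (hra : ra < p.length) (hrb : rb < p.length) (hrra : pvRoot p ra) (hrrb : pvRoot p rb)
    (hne : ra ≠ rb) (hcc : cu ≠ cv)
    (hcls : (comp.getD ra 0 = cu ∧ comp.getD rb 0 = cv) ∨
            (comp.getD ra 0 = cv ∧ comp.getD rb 0 = cu)) :
    pvInv (p.set rb ((ra : Nat) : Int)) (comp.map (fun c => if c = cv then cu else c)) := by
  set g : Int → Int := fun c => if c = cv then cu else c with hg
  set p' := p.set rb ((ra : Nat) : Int) with hp'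
  set comp' := comp.map g with hcomp'
  have hlen : p'.length = p.length := by simp [hp']
  have hlenc : comp'.length = comp.length := by simp [hcomp']
  have hLc : p.length = comp.length := h.1
  have hstep : ∀ j, pvStep p' j = if j = rb then ra else pvStep p j :=
    fun j => pvStep_set p rb j _ hrb
  have hgj : ∀ j, j < p.length → comp'.getD j 0 = g (comp.getD j 0) := by
    intro j hj; exact pvGetD_map g comp j (by omega)
  have hroots : ∀ j, pvRoot p' j ↔ j ≠ rb ∧ pvRoot p j := pvLink_root_iff p ra rb hrb hne
  have hgab : g (comp.getD ra 0) = g (comp.getD rb 0) := by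
    rcases hcls with ⟨h1, h2⟩ | ⟨h1, h2⟩ <;> rw [h1, h2] <;> simp [hg, hcc]
  refine ⟨by omega, ?_, ?_, ?_, ?_⟩
  · intro j hj
    rw [hlen] at hj ⊢
    rw [hp', pvGetD_set p rb j _ hrb]
    split_ifs
    · exact ⟨by positivity, by exact_mod_cast hra⟩
    · exact h.2.1 j hj
  · intro j hj
    rw [hlen] at hj
    rw [hstep j]
    split_ifs with hj2
    · rw [hgj ra hra, hgj j hj, hj2]
      exact hgab
    · rw [hgj _ (pvStep_lt p comp h j hj), hgj j hj, h.2.2.1 j hj]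
  · intro a b ha hb hroota hrootb hcab
    rw [hlen] at ha hb
    obtain ⟨hanb, hroota'⟩ := (hroots a).1 hroota
    obtain ⟨hbnb, hrootb'⟩ := (hroots b).1 hrootb
    rw [hgj a ha, hgj b hb] at hcab
    by_cases hcc2 : comp.getD a 0 = comp.getD b 0
    · exact h.2.2.2.1 a b ha hb hroota' hrootb' hcc2
    · exfalso
      have hclass : (comp.getD a 0 = cv ∧ comp.getD b 0 = cu) ∨
          (comp.getD b 0 = cv ∧ comp.getD a 0 = cu) := by
        simp only [hg] at hcab
        split_ifs at hcab <;> omega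
      rcases hcls with ⟨hca, hcb⟩ | ⟨hca, hcb⟩
      · rcases hclass with ⟨h1, -⟩ | ⟨h1, -⟩
        · exact hanb (h.2.2.2.1 a rb ha hrb hroota' hrrb (by rw [h1, hcb]))
        · exact hbnb (h.2.2.2.1 b rb hb hrb hrootb' hrrb (by rw [h1, hcb]))
      · rcases hclass with ⟨-, h1⟩ | ⟨-, h1⟩
        · exact hbnb (h.2.2.2.1 b rb hb hrb hrootb' hrrb (by rw [h1, hcb]))
        · exact hanb (h.2.2.2.1 a rb ha hrb hroota' hrrb (by rw [h1, hcb]))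
  · intro j hj
    rw [hlen] at hj
    obtain ⟨m0, hm0⟩ := h.2.2.2.2 j hj
    clear hj
    induction m0 using Nat.strong_induction_on generalizing j with
    | _ m0 ih =>
      by_cases hr : pvRoot p j
      · by_cases hjb : j = rb
        · refine ⟨1, ?_⟩
          have h5 : (pvStep p')^[1] j = ra := by
            simp [hstep, hjb]
          rw [h5]
          exact (hroots ra).2 ⟨hne, hrra⟩
        · exact ⟨0, (hroots j).2 ⟨hjb, hr⟩⟩
      · have hm0' : m0 ≠ 0 := by rintro rfl; exact hr hm0
        have hjb : j ≠ rb := by rintro rfl; exact hr hrrb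
        have hit : (pvStep p)^[m0] j = (pvStep p)^[m0 - 1] (pvStep p j) := by
          conv_lhs => rw [show m0 = (m0 - 1) + 1 by omega]
          rw [Function.iterate_succ_apply]
        rw [hit] at hm0
        obtain ⟨m', hm'⟩ := ih (m0 - 1) (by omega) (pvStep p j) hm0
        refine ⟨m' + 1, ?_⟩
        rw [Function.iterate_succ_apply, hstep j, if_neg hjb]
        exact hm'
lemma pvUnionA_spec (p sz comp : List Int) (nc : Int) (h : pvInv p comp) (u v : Int)
    (hu1 : -(p.length : Int) ≤ u) (hu2 : u < p.length)
    (hv1 : -(p.length : Int) ≤ v) (hv2 : v < p.length) :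
    ∃ res p' sz', pvUnionA p sz nc u v = (res, p', sz', if res then nc - 1 else nc) ∧
      p'.length = p.length ∧
      (res = false → comp.getD (pvNorm p.length u) 0 = comp.getD (pvNorm p.length v) 0 ∧
        pvInv p' comp) ∧
      (res = true → comp.getD (pvNorm p.length u) 0 ≠ comp.getD (pvNorm p.length v) 0 ∧
        pvInv p' (comp.map (fun c => if c = comp.getD (pvNorm p.length v) 0
          then comp.getD (pvNorm p.length u) 0 else c))) := by
  obtain ⟨ru, p1, hequ, hruL, hruroot, hcompu, hlen1, hInv1, hiff1⟩ :=
    pvFindA_spec p comp h u hu1 hu2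
  obtain ⟨rv, p2, heqv, hrvL, hrvroot, hcompv, hlen2, hInv2, hiff2⟩ :=
    pvFindA_spec p1 comp hInv1 v (by omega) (by omega)
  rw [hlen1] at hrvL hlen2
  have hnormv : pvNorm p1.length v = pvNorm p.length v := by rw [hlen1]
  rw [hnormv] at hcompv
  have hruroot2 : pvRoot p2 ru := (hiff2 ru).2 hruroot
  by_cases hres : ru = rv
  · refine ⟨false, p2, sz, ?_, by omega, fun _ => ⟨?_, hInv2⟩, by simp⟩
    · simp only [pvUnionA, hequ, heqv]
      rw [if_pos (by exact_mod_cast hres)]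
      simp
    · rw [← hcompu, ← hcompv, hres]
  · have hcc : comp.getD (pvNorm p.length u) 0 ≠ comp.getD (pvNorm p.length v) 0 := by
      intro heqc
      exact hres (hInv2.2.2.2.1 ru rv (by omega) (by omega) hruroot2 hrvroot
        (by rw [hcompu, hcompv]; exact heqc))
    have hcast : ¬ (((ru : Nat) : Int) = ((rv : Nat) : Int)) := by exact_mod_cast hres
    by_cases hsz : PySem.List.pyGetD sz ((ru : Nat) : Int) 0 < PySem.List.pyGetD sz ((rv : Nat) : Int) 0
    · refine ⟨true, p2.set ru ((rv : Nat) : Int),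
        PySem.List.pySetD sz ((rv : Nat) : Int)
          (PySem.List.pyGetD sz ((rv : Nat) : Int) 0 + PySem.List.pyGetD sz ((ru : Nat) : Int) 0),
        ?_, by simp; omega, by simp, fun _ => ⟨hcc, ?_⟩⟩
      · simp only [pvUnionA, hequ, heqv]
        rw [if_neg hcast, if_pos hsz,
          pvSetD_of_bounds p2 ((ru : Nat) : Int) ((rv : Nat) : Int) (by omega)
            (by exact_mod_cast (by omega : ru < p2.length)), pvNorm_natCast]
        simp
      · exact pvLink_inv p2 comp hInv2 rv ru _ _ (by omega) (by omega) hrvroot hruroot2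
          (Ne.symm hres) hcc (Or.inr ⟨hcompv, hcompu⟩)
    · refine ⟨true, p2.set rv ((ru : Nat) : Int),
        PySem.List.pySetD sz ((ru : Nat) : Int)
          (PySem.List.pyGetD sz ((ru : Nat) : Int) 0 + PySem.List.pyGetD sz ((rv : Nat) : Int) 0),
        ?_, by simp; omega, by simp, fun _ => ⟨hcc, ?_⟩⟩
      · simp only [pvUnionA, hequ, heqv]
        rw [if_neg hcast, if_neg hsz,
          pvSetD_of_bounds p2 ((rv : Nat) : Int) ((ru : Nat) : Int) (by omega)
            (by exact_mod_cast (by omega : rv < p2.length)), pvNorm_natCast]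
        simp
      · exact pvLink_inv p2 comp hInv2 ru rv _ _ (by omega) (by omega) hruroot2 hrvroot
          hres hcc (Or.inl ⟨hcompu, hcompv⟩)
lemma pvInit_getD (L k : Nat) (hk : k < L) :
    ((List.range L).map Int.ofNat).getD k 0 = (k : Int) := by
  rw [List.getD_eq_getElem?_getD]
  rw [List.getElem?_eq_getElem (by simp [hk])]
  simp

lemma pvInit_inv (L : Nat) :
    pvInv ((List.range L).map Int.ofNat) ((List.range L).map Int.ofNat) := by
  set p := (List.range L).map Int.ofNat with hp
  have hlen : p.length = L := by simp [hp]
  have hget : ∀ k, k < L → p.getD k 0 = (k : Int) := fun k hk => pvInit_getD L k hk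
  have hstep : ∀ k, k < L → pvStep p k = k := by
    intro k hk; unfold pvStep; rw [hget k hk]; simp
  refine ⟨rfl, ?_, ?_, ?_, ?_⟩
  · intro k hk
    rw [hlen] at hk
    rw [hget k hk, hlen]
    constructor
    · positivity
    · exact_mod_cast hk
  · intro k hk
    rw [hlen] at hk
    rw [hstep k hk]
  · intro k j hk hj hrk hrj hc
    rw [hlen] at hk hj
    rw [hget k hk, hget j hj] at hc
    exact_mod_cast hc
  · intro k hk
    rw [hlen] at hk
    exact ⟨0, by simpa using hget k hk⟩

lemma pvLoop (edges : List (Int × Int)) (n : Int) :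
    ∀ (idxs : List Int) (p sz comp : List Int) (nc rk : Int),
    (idxs.all (fun idx =>
      match PySem.List.pyGet? edges idx with
      | some uv => decide (-n ≤ uv.1 ∧ uv.1 < n ∧ -n ≤ uv.2 ∧ uv.2 < n)
      | none => false) = true) →
    p.length = n.toNat → comp.length = n.toNat → pvInv p comp →
    (idxs.foldl
      (fun (st : List Int × List Int × Int × Int) idx =>
        match PySem.List.pyGet? edges idx with
        | none => st
        | some uv =>
          let r := pvUnionA st.1 st.2.1 st.2.2.1 uv.1 uv.2
          (r.2.1, r.2.2.1, r.2.2.2, if r.1 then st.2.2.2 + 1 else st.2.2.2))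
      (p, sz, nc, rk)).2.2.2 =
    (idxs.foldl
      (fun (st : List Int × Int) idx =>
        match PySem.List.pyGet? edges idx with
        | none => st
        | some uv =>
          match PySem.List.pyGet? st.1 uv.1, PySem.List.pyGet? st.1 uv.2 with
          | some cu, some cv =>
            if cu ≠ cv then (st.1.map (fun c => if c = cv then cu else c), st.2 + 1) else st
          | _, _ => st)
      (comp, rk)).2 := by
  intro idxs
  induction idxs with
  | nil => intro p sz comp nc rk hall hlp hlc hInv; rfl
  | cons idx rest ih =>
    intro p sz comp nc rk hall hlp hlc hInv
    rw [List.all_cons, Bool.and_eq_true] at hall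
    obtain ⟨hhead, htail⟩ := hall
    cases hopt : PySem.List.pyGet? edges idx with
    | none => rw [hopt] at hhead; simp at hhead
    | some uv =>
      rw [hopt] at hhead
      have hbounds : -n ≤ uv.1 ∧ uv.1 < n ∧ -n ≤ uv.2 ∧ uv.2 < n := of_decide_eq_true hhead
      have hn : 0 < n := by omega
      have hcast : ((n.toNat : Nat) : Int) = n := by omega
      obtain ⟨res, p', sz', hequ, hlen', hfalse, htrue⟩ :=
        pvUnionA_spec p sz comp nc hInv uv.1 uv.2 (by omega) (by omega) (by omega) (by omega)
      have hnp : pvNorm p.length uv.1 = pvNorm n.toNat uv.1 := by rw [hlp]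
      have hnp2 : pvNorm p.length uv.2 = pvNorm n.toNat uv.2 := by rw [hlp]
      rw [hnp, hnp2] at hfalse htrue
      have hgu : PySem.List.pyGet? comp uv.1 = some (comp.getD (pvNorm n.toNat uv.1) 0) := by
        rw [← hlc]
        exact pvGet?_of_bounds comp uv.1 (by omega) (by omega)
      have hgv : PySem.List.pyGet? comp uv.2 = some (comp.getD (pvNorm n.toNat uv.2) 0) := by
        rw [← hlc]
        exact pvGet?_of_bounds comp uv.2 (by omega) (by omega)
      rw [List.foldl_cons, List.foldl_cons]
      cases res with
      | false =>
        obtain ⟨hcveq, hInv'⟩ := hfalse rfl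
        simp only [Bool.false_eq_true, if_false] at hequ
        simp only [hopt, hequ, hgu, hgv, Bool.false_eq_true, if_false]
        rw [if_neg (by simpa using hcveq)]
        exact ih p' sz' comp nc rk htail (by omega) hlc hInv'
      | true =>
        obtain ⟨hcne, hInvm⟩ := htrue rfl
        simp only [if_true] at hequ
        simp only [hopt, hequ, hgu, hgv, if_true]
        rw [if_pos (by simpa using hcne)]
        exact ih p' _ _ (nc - 1) (rk + 1) htail (by omega) (by simpa using hlc) hInvm

-- ===== VERDICT (by name: the statement is the Claim_ definition above) =====
theorem matroid_rank_py_spec : Claim_equal_matroid_rank_py := by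
  intro edges n idxs hdom hpre
  unfold Spec_matroid_rank_py matroid_rank_py matroid_rank_py_alt
  exact pvLoop edges n idxs _ _ _ n 0 hpre (by simp) (by simp) (pvInit_inv n.toNat)
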